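-- pv_equiv track=rewrite | github.com/ibtissem101/Advent-Of-Code-2025 | 3rdday/day3-part2.py | find_best_digit
-- ===== SOURCE A (Python) =====
-- def find_best_digit(s, positions_remaining):
--     """
--     Find the index of the best left digit in string s,
--     using the hop-based greedy algorithm.
--     """
--     i = 0
--     while i < len(s):
--         jumped = False
--         for j in range(i + 1, len(s)):
--             remaining_after = len(s) - j  # digits including s[j]
--             if s[j] > s[i] and remaining_after >= positions_remaining:
--                 i = j  # hop to bigger digit
--                 jumped = True
--                 break
--         if not jumped:
--             break
--     return i  # index of chosen digit
-- ===== SOURCE B (Python) =====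
-- def find_best_digit(s, positions_remaining):
--     """Single linear scan: leftmost maximal character among index 0 and
--     indices 1..len(s)-positions_remaining."""
--     limit = min(len(s) - positions_remaining, len(s) - 1)
--     best = 0
--     for j in range(1, limit + 1):
--         if s[j] > s[best]:
--             best = j
--     return best
-- ===== Notes on version B (the rewrite author's own statement) =====
-- stated objective: faster
-- what changed: Replaces A's quadratic hop-based greedy (restart an inner left-to-right scan after every hop) with a single linear scan that returns the leftmost maximal character among index 0 and the indices j with len(s)-j >= positions_remaining.
import Mathlib
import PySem

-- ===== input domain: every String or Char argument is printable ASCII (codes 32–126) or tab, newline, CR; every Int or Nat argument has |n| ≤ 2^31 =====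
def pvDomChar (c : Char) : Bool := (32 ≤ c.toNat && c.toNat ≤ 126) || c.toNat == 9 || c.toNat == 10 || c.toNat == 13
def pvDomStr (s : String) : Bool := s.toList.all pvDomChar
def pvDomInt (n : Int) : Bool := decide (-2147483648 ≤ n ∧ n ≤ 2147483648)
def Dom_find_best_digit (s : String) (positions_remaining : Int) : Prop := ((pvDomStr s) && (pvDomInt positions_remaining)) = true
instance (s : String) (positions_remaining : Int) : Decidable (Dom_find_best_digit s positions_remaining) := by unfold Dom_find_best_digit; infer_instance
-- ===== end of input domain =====

-- B replaces A's quadratic hop-based greedy by a single left-to-right scan for the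
-- leftmost maximal character of the admissible prefix (objective: faster, asymptotic).

-- ===== PORT A =====
-- inner `for j in range(i+1, len(s))` loop of A: first j with s[j] > s[i] and
-- len(s) - j >= positions_remaining, or none
def findHop (cs : List Char) (i : Nat) (pr : Int) (j : Nat) : Option Nat :=
  if _ : j < cs.length then
    if cs[i]! < cs[j]! ∧ (cs.length : Int) - (j : Int) ≥ pr then some j
    else findHop cs i pr (j + 1)
  else none
termination_by cs.length - j

-- needed by outerA's termination proof
theorem findHop_some_bounds (cs : List Char) (i : Nat) (pr : Int) :
    ∀ j0 j, findHop cs i pr j0 = some j → j0 ≤ j ∧ j < cs.length := by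
  intro j0
  induction j0 using findHop.induct cs i pr with
  | case1 j0 hlt hc => intro j h; rw [findHop, dif_pos hlt, if_pos hc] at h
                       cases h; omega
  | case2 j0 hlt hc ih => intro j h; rw [findHop, dif_pos hlt, if_neg hc] at h
                          have := ih j h; omega
  | case3 j0 hlt => intro j h; rw [findHop, dif_neg hlt] at h; cases h

-- outer `while i < len(s)` loop of A
def outerA (cs : List Char) (pr : Int) (i : Nat) : Nat :=
  if _ : i < cs.length then
    match h : findHop cs i pr (i + 1) with
    | some j => outerA cs pr j
    | none => i
  else i
termination_by cs.length - i
decreasing_by have := findHop_some_bounds cs i pr (i + 1) j h; omega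

def find_best_digit (s : String) (positions_remaining : Int) : Int :=
  (outerA s.toList positions_remaining 0 : Int)

-- ===== PORT B =====
-- `for j in range(1, limit + 1)` of Source B; since limit ≤ len(s) - 1 the conjunct
-- j < cs.length is a pure totality guard (it never fires before j > limit does not)
def scanB (cs : List Char) (limit : Int) (best : Nat) (j : Nat) : Nat :=
  if _ : j < cs.length ∧ (j : Int) ≤ limit then
    scanB cs limit (if cs[best]! < cs[j]! then j else best) (j + 1)
  else best
termination_by cs.length - j

def find_best_digit_alt (s : String) (positions_remaining : Int) : Int :=
  let cs := s.toList
  let limit := min ((cs.length : Int) - positions_remaining) ((cs.length : Int) - 1)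
  (scanB cs limit 0 1 : Int)

-- ===== PRECONDITION & SPEC =====
def Spec_find_best_digit (s : String) (positions_remaining : Int) (out : Int) : Prop := out = find_best_digit_alt s positions_remaining
instance (s : String) (positions_remaining : Int) (out : Int) : Decidable (Spec_find_best_digit s positions_remaining out) := by unfold Spec_find_best_digit; infer_instance

-- ===== CLAIM (what is proved, stated in full; the proofs are below) =====
def Claim_equal_find_best_digit : Prop := ∀ (s : String) (positions_remaining : Int), Dom_find_best_digit s positions_remaining → Spec_find_best_digit s positions_remaining (find_best_digit s positions_remaining)

-- ===== LEMMAS AND PROOFS =====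

-- j is an admissible hop target of A
def Good (cs : List Char) (pr : Int) (j : Nat) : Prop :=
  0 < j ∧ j < cs.length ∧ (cs.length : Int) - (j : Int) ≥ pr

-- m is the leftmost maximal index of {0} ∪ {admissible j}
def IsRes (cs : List Char) (pr : Int) (m : Nat) : Prop :=
  (m = 0 ∨ Good cs pr m) ∧
  (∀ j, Good cs pr j → ¬ cs[m]! < cs[j]!) ∧
  (∀ j, j < m → cs[j]! < cs[m]!)

theorem IsRes_unique (cs : List Char) (pr : Int) (m1 m2 : Nat)
    (h1 : IsRes cs pr m1) (h2 : IsRes cs pr m2) : m1 = m2 := by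
  rcases Nat.lt_trichotomy m1 m2 with h | h | h
  · exact absurd (h2.2.2 m1 h) (not_lt.mpr (le_of_not_gt
      (h1.2.1 m2 (h2.1.resolve_left (by omega)))))
  · exact h
  · exact absurd (h1.2.2 m2 h) (not_lt.mpr (le_of_not_gt
      (h2.2.1 m1 (h1.1.resolve_left (by omega)))))

theorem findHop_none (cs : List Char) (i : Nat) (pr : Int) :
    ∀ j0, findHop cs i pr j0 = none →
      ∀ j, j0 ≤ j → j < cs.length → (cs.length : Int) - (j : Int) ≥ pr →
        ¬ cs[i]! < cs[j]! := by
  intro j0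
  induction j0 using findHop.induct cs i pr with
  | case1 j0 hlt hc => intro h; rw [findHop, dif_pos hlt, if_pos hc] at h; cases h
  | case2 j0 hlt hc ih =>
      intro h j hj hjn hpr hlt'
      rw [findHop, dif_pos hlt, if_neg hc] at h
      rcases Nat.eq_or_lt_of_le hj with rfl | hj'
      · exact hc ⟨hlt', hpr⟩
      · exact ih h j hj' hjn hpr hlt'
  | case3 j0 hlt =>
      intro _ j hj hjn _ _
      exact absurd hjn (by omega)

theorem findHop_some (cs : List Char) (i : Nat) (pr : Int) :
    ∀ j0 j, findHop cs i pr j0 = some j →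
      (j0 ≤ j ∧ j < cs.length ∧ cs[i]! < cs[j]! ∧ (cs.length : Int) - (j : Int) ≥ pr) ∧
      (∀ k, j0 ≤ k → k < j → (cs.length : Int) - (k : Int) ≥ pr → ¬ cs[i]! < cs[k]!) := by
  intro j0
  induction j0 using findHop.induct cs i pr with
  | case1 j0 hlt hc =>
      intro j h; rw [findHop, dif_pos hlt, if_pos hc] at h
      cases h
      exact ⟨⟨le_refl _, hlt, hc.1, hc.2⟩, fun k hk hk' _ _ => by omega⟩
  | case2 j0 hlt hc ih =>
      intro j h; rw [findHop, dif_pos hlt, if_neg hc] at h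
      obtain ⟨h1, h2⟩ := ih j h
      refine ⟨⟨by omega, h1.2⟩, ?_⟩
      intro k hk hk' hpr hlt'
      rcases Nat.eq_or_lt_of_le hk with rfl | hk''
      · exact hc ⟨hlt', hpr⟩
      · exact h2 k hk'' hk' hpr hlt'
  | case3 j0 hlt => intro j h; rw [findHop, dif_neg hlt] at h; cases h

-- A's greedy hop loop lands on the leftmost maximal admissible index
theorem outerA_isRes (cs : List Char) (pr : Int) :
    ∀ i, i < cs.length → (i = 0 ∨ Good cs pr i) →
      (∀ k, k < i → cs[k]! < cs[i]!) →
      IsRes cs pr (outerA cs pr i) := by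
  intro i
  induction i using outerA.induct cs pr with
  | case1 i hi j hfind ih =>
      intro _ hset hprev
      rw [outerA, dif_pos hi, hfind]
      obtain ⟨⟨hle, hjn, hlt, hpr⟩, hfirst⟩ := findHop_some cs i pr (i + 1) j hfind
      refine ih hjn (Or.inr ⟨by omega, hjn, hpr⟩) ?_
      intro k hk
      rcases Nat.lt_trichotomy k i with hki | rfl | hik
      · exact lt_trans (hprev k hki) hlt
      · exact hlt
      · exact lt_of_le_of_lt (le_of_not_gt (hfirst k (by omega) hk
          (by omega))) hlt
  | case2 i hi hfind =>
      intro _ hset hprev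
      rw [outerA, dif_pos hi, hfind]
      refine ⟨hset, ?_, hprev⟩
      intro j hj hlt
      rcases Nat.lt_trichotomy j i with hji | rfl | hij
      · exact absurd hlt (asymm (hprev j hji))
      · exact absurd hlt (lt_irrefl _)
      · exact findHop_none cs i pr (i + 1) hfind j (by omega) hj.2.1 hj.2.2 hlt
  | case3 i hi => intro h; omega

-- B's scan maintains "best is the leftmost maximal index seen so far"
theorem scanB_isRes (cs : List Char) (pr : Int)
    (limit : Int) (hlim : limit = min ((cs.length : Int) - pr) ((cs.length : Int) - 1)) :
    ∀ n j best, cs.length - j ≤ n → 0 < j → best < cs.length → best < j →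
      (best = 0 ∨ Good cs pr best) →
      (∀ k, 0 < k → k < j → Good cs pr k → ¬ cs[best]! < cs[k]!) →
      (∀ k, k < best → cs[k]! < cs[best]!) →
      IsRes cs pr (scanB cs limit best j) := by
  intro n
  induction n with
  | zero =>
      intro j best hn h0 hb hbj hset hseen hprev
      rw [scanB, dif_neg (by omega)]
      refine ⟨hset, ?_, hprev⟩
      intro k hk
      have hklim : (k : Int) ≤ limit := by
        rw [hlim]; obtain ⟨k0, kn, kp⟩ := hk; omega
      exact hseen k hk.1 (by obtain ⟨k0, kn, kp⟩ := hk; omega) hk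
  | succ n ih =>
      intro j best hn h0 hb hbj hset hseen hprev
      rw [scanB]
      by_cases hg : j < cs.length ∧ (j : Int) ≤ limit
      · rw [dif_pos hg]
        have hjgood : Good cs pr j := ⟨h0, hg.1, by rw [hlim] at hg; omega⟩
        have hkgood : ∀ k, 0 < k → k < j → Good cs pr k := by
          intro k k0 kj
          exact ⟨k0, by omega, by rw [hlim] at hg; omega⟩
        by_cases hc : cs[best]! < cs[j]!
        · rw [if_pos hc]
          refine ih (j + 1) j (by omega) (by omega) hg.1 (by omega) (Or.inr hjgood) ?_ ?_
          · intro k k0 kj1 kg hlt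
            rcases Nat.lt_trichotomy k j with kj | rfl | kj
            · exact hseen k k0 kj kg (lt_trans hc hlt)
            · exact lt_irrefl _ hlt
            · omega
          · intro k kj
            rcases Nat.lt_trichotomy k best with kb | rfl | kb
            · exact lt_trans (hprev k kb) hc
            · exact hc
            · have := hseen k (by omega) kj (hkgood k (by omega) kj)
              exact lt_of_le_of_lt (le_of_not_gt this) hc
        · rw [if_neg hc]
          refine ih (j + 1) best (by omega) (by omega) hb (by omega) hset ?_ hprev
          intro k k0 kj1 kg hlt
          rcases Nat.lt_trichotomy k j with kj | rfl | kj
          · exact hseen k k0 kj kg hlt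
          · exact hc hlt
          · omega
      · rw [dif_neg hg]
        refine ⟨hset, ?_, hprev⟩
        intro k hk hlt
        obtain ⟨k0, kn, kp⟩ := hk
        have hklim : (k : Int) ≤ limit := by rw [hlim]; omega
        rcases Nat.lt_or_ge k j with kj | kj
        · exact hseen k k0 kj ⟨k0, kn, kp⟩ hlt
        · have : (j : Int) ≤ limit := by omega
          exact hg ⟨by omega, this⟩

-- ===== VERDICT (by name: the statement is the Claim_ definition above) =====
theorem find_best_digit_spec : Claim_equal_find_best_digit := by
  intro s pr _
  unfold Spec_find_best_digit find_best_digit find_best_digit_alt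
  show (outerA s.toList pr 0 : Int)
      = (scanB s.toList (min ((s.toList.length : Int) - pr) ((s.toList.length : Int) - 1)) 0 1 : Int)
  by_cases hn : s.toList.length = 0
  · rw [outerA, scanB, dif_neg (by omega), dif_neg (by omega)]
  · have hA := outerA_isRes s.toList pr 0 (by omega) (Or.inl rfl)
      (fun k hk => absurd hk (by omega))
    have hB := scanB_isRes s.toList pr
        (min ((s.toList.length : Int) - pr) ((s.toList.length : Int) - 1)) rfl
        s.toList.length 1 0 (by omega) (by omega) (by omega) (by omega) (Or.inl rfl)
        (fun k k0 k1 => absurd k1 (by omega)) (fun k hk => absurd hk (by omega))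
    exact_mod_cast IsRes_unique s.toList pr _ _ hA hB
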